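-- pv_equiv track=rewrite | github.com/TheSeanLavery/BubbleSockets | simple_server.py | wave_pattern
-- ===== SOURCE A (Python) =====
-- def wave_pattern(rows, cols, horizontal=True):
--     result = []
--
--     if horizontal:
--         for r in range(rows):
--             row_bubbles = []
--             for c in range(cols):
--                 row_bubbles.append(r * cols + c)
--
--             # Alternate direction for even/odd rows
--             if r % 2 == 1:
--                 row_bubbles.reverse()
--
--             result.extend(row_bubbles)
--     else:  # vertical
--         for c in range(cols):
--             col_bubbles = []
--             for r in range(rows):
--                 col_bubbles.append(r * cols + c)
--
--             # Alternate direction for even/odd columns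
--             if c % 2 == 1:
--                 col_bubbles.reverse()
--
--             result.extend(col_bubbles)
--
--     return result
-- ===== SOURCE B (Python) =====
-- def wave_pattern(rows, cols, horizontal=True):
--     if rows <= 0 or cols <= 0:
--         return []
--     if horizontal:
--         return [r * cols + (c if r % 2 == 0 else cols - 1 - c)
--                 for r, c in (divmod(i, cols) for i in range(rows * cols))]
--     else:
--         return [(r if c % 2 == 0 else rows - 1 - r) * cols + c
--                 for c, r in (divmod(i, rows) for i in range(rows * cols))]
-- ===== Notes on version B (the rewrite author's own statement) =====
-- stated objective: alternative
-- what changed: Replaced the nested row/column loops that build each sub-list and conditionally reverse it with a single flat pass over range(rows*cols) that computes every element directly from divmod and a closed-form parity formula.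
import Mathlib
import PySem

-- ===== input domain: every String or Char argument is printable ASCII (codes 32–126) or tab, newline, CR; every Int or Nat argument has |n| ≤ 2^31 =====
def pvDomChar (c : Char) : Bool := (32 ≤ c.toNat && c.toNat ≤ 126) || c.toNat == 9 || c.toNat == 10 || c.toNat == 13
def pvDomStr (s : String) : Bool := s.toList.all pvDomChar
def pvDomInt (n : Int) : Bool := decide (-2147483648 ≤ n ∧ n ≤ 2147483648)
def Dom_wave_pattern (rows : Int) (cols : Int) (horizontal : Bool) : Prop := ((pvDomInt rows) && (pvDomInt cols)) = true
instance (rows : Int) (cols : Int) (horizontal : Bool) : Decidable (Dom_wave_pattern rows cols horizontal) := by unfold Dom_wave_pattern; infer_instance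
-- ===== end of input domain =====

-- B replaces the nested loops with conditional reversal by one flat pass computing each
-- element from divmod and a parity formula (objective: alternative decomposition, same cost).

-- ===== PORT A =====
def wave_pattern (rows : Int) (cols : Int) (horizontal : Bool) : List Int :=
  if horizontal then
    (PySem.List.pyRange 0 rows 1).foldl (fun result r =>
      let row_bubbles : List Int :=
        (PySem.List.pyRange 0 cols 1).foldl (fun rb c => rb ++ [r * cols + c]) []
      let row_bubbles :=
        if PySem.Int.mod r 2 == 1 then row_bubbles.reverse else row_bubbles
      result ++ row_bubbles) []
  else
    (PySem.List.pyRange 0 cols 1).foldl (fun result c =>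
      let col_bubbles : List Int :=
        (PySem.List.pyRange 0 rows 1).foldl (fun cb r => cb ++ [r * cols + c]) []
      let col_bubbles :=
        if PySem.Int.mod c 2 == 1 then col_bubbles.reverse else col_bubbles
      result ++ col_bubbles) []

-- ===== PORT B =====
def wave_pattern_alt (rows : Int) (cols : Int) (horizontal : Bool) : List Int :=
  if rows ≤ 0 || cols ≤ 0 then []
  else if horizontal then
    (PySem.List.pyRange 0 (rows * cols) 1).map (fun i =>
      let r := PySem.Int.floordiv i cols
      let c := PySem.Int.mod i cols
      r * cols + (if PySem.Int.mod r 2 == 0 then c else cols - 1 - c))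
  else
    (PySem.List.pyRange 0 (rows * cols) 1).map (fun i =>
      let c := PySem.Int.floordiv i rows
      let r := PySem.Int.mod i rows
      (if PySem.Int.mod c 2 == 0 then r else rows - 1 - r) * cols + c)

-- ===== PRECONDITION & SPEC =====
def Spec_wave_pattern (rows : Int) (cols : Int) (horizontal : Bool) (out : List Int) : Prop := out = wave_pattern_alt rows cols horizontal
instance (rows : Int) (cols : Int) (horizontal : Bool) (out : List Int) : Decidable (Spec_wave_pattern rows cols horizontal out) := by unfold Spec_wave_pattern; infer_instance

-- ===== CLAIM (what is proved, stated in full; the proofs are below) =====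
def Claim_equal_wave_pattern : Prop := ∀ (rows : Int) (cols : Int) (horizontal : Bool), Dom_wave_pattern rows cols horizontal → Spec_wave_pattern rows cols horizontal (wave_pattern rows cols horizontal)

-- ===== LEMMAS AND PROOFS =====

-- Generic block decomposition: a map over range (M*N) is a flatMap of M blocks of size N.
theorem pv_core_gen (M N : Nat) (F : Int → Int) (G : Int → List Int)
    (hblock : ∀ q : Nat, q < M →
      (List.range N).map (fun j => F ((q * N + j : Nat) : Int)) = G (q : Nat)) :
    (List.range (M * N)).map (fun i => F (i : Nat)) =
      (List.range M).flatMap (fun q => G (q : Nat)) := by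
  induction M with
  | zero => simp
  | succ m ih =>
    have hm : (m + 1) * N = m * N + N := by ring
    rw [hm, List.range_add, List.map_append, List.map_map, List.range_succ,
      List.flatMap_append]
    congr 1
    · exact ih (fun q hq => hblock q (Nat.lt_succ_of_lt hq))
    · simpa using hblock m (Nat.lt_succ_self m)

-- Reversing the ascending row is the same as emitting cols-1-c directly.
theorem pv_rev_block (C : Nat) (f : Int → Int) :
    ((List.range C).map (fun c : Nat => f ((C : Int) - 1 - (c : Nat)))) =
      ((List.range C).map (fun c : Nat => f (c : Nat))).reverse := by
  apply List.ext_getElem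
  · simp
  · intro k h1 h2
    simp only [List.length_map, List.length_range] at h1
    rw [List.getElem_reverse]
    simp only [List.getElem_map, List.getElem_range, List.length_map, List.length_range]
    congr 1
    have : ((C - 1 - k : Nat) : Int) = (C : Int) - 1 - (k : Int) := by omega
    rw [this]

-- divmod of q*N + j by N, in cast form.
theorem pv_fdiv (q N j : Nat) (hN : 0 < N) (hj : j < N) :
    PySem.Int.floordiv ((q * N + j : Nat) : Int) (N : Int) = (q : Int) := by
  rw [PySem.Int.floordiv_natCast]
  congr 1
  rw [Nat.mul_comm, Nat.mul_add_div hN, Nat.div_eq_of_lt hj, Nat.add_zero]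

theorem pv_fmod (q N j : Nat) (hj : j < N) :
    PySem.Int.mod ((q * N + j : Nat) : Int) (N : Int) = (j : Int) := by
  rw [PySem.Int.mod_natCast]
  congr 1
  rw [Nat.mul_comm, Nat.mul_add_mod, Nat.mod_eq_of_lt hj]

theorem pv_mod_two (q : Nat) : PySem.Int.mod (q : Nat) 2 = ((q % 2 : Nat) : Int) := by
  exact_mod_cast PySem.Int.mod_natCast q 2

-- The horizontal equivalence on a positive R x C grid, in List.range form.
theorem pv_main_h (R C : Nat) (hC : 0 < C) :
    (List.range (R * C)).map (fun i : Nat =>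
        PySem.Int.floordiv (i : Nat) (C : Int) * (C : Int) +
          (if PySem.Int.mod (PySem.Int.floordiv (i : Nat) (C : Int)) 2 == 0 then
            PySem.Int.mod (i : Nat) (C : Int)
          else (C : Int) - 1 - PySem.Int.mod (i : Nat) (C : Int))) =
      (List.range R).flatMap (fun r : Nat =>
        if PySem.Int.mod (r : Nat) 2 == 1 then
          ((List.range C).map (fun c : Nat => (r : Int) * (C : Int) + (c : Nat))).reverse
        else (List.range C).map (fun c : Nat => (r : Int) * (C : Int) + (c : Nat))) := by
  apply pv_core_gen R C
    (F := fun i => PySem.Int.floordiv i (C : Int) * (C : Int) +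
      (if PySem.Int.mod (PySem.Int.floordiv i (C : Int)) 2 == 0 then
        PySem.Int.mod i (C : Int)
      else (C : Int) - 1 - PySem.Int.mod i (C : Int)))
    (G := fun r => if PySem.Int.mod r 2 == 1 then
          ((List.range C).map (fun c : Nat => r * (C : Int) + (c : Nat))).reverse
        else (List.range C).map (fun c : Nat => r * (C : Int) + (c : Nat)))
  intro q hq
  by_cases hpar : q % 2 = 1
  · rw [if_pos (by rw [pv_mod_two, hpar]; rfl), ← pv_rev_block C (fun c => (q : Int) * (C : Int) + c)]
    apply List.map_congr_left
    intro j hj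
    simp only [List.mem_range] at hj
    rw [pv_fdiv q C j hC hj, pv_fmod q C j hj, pv_mod_two,
      if_neg (by rw [hpar]; decide)]
  · have hpar0 : q % 2 = 0 := by omega
    rw [if_neg (by rw [pv_mod_two, hpar0]; decide)]
    apply List.map_congr_left
    intro j hj
    simp only [List.mem_range] at hj
    rw [pv_fdiv q C j hC hj, pv_fmod q C j hj, pv_mod_two,
      if_pos (by rw [hpar0]; rfl)]

-- The vertical equivalence on a positive R x C grid, in List.range form.
theorem pv_main_v (R C : Nat) (hR : 0 < R) :
    (List.range (C * R)).map (fun i : Nat =>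
        (if PySem.Int.mod (PySem.Int.floordiv (i : Nat) (R : Int)) 2 == 0 then
            PySem.Int.mod (i : Nat) (R : Int)
          else (R : Int) - 1 - PySem.Int.mod (i : Nat) (R : Int)) * (C : Int) +
          PySem.Int.floordiv (i : Nat) (R : Int)) =
      (List.range C).flatMap (fun c : Nat =>
        if PySem.Int.mod (c : Nat) 2 == 1 then
          ((List.range R).map (fun r : Nat => (r : Int) * (C : Int) + (c : Nat))).reverse
        else (List.range R).map (fun r : Nat => (r : Int) * (C : Int) + (c : Nat))) := by
  apply pv_core_gen C R
    (F := fun i => (if PySem.Int.mod (PySem.Int.floordiv i (R : Int)) 2 == 0 then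
        PySem.Int.mod i (R : Int)
      else (R : Int) - 1 - PySem.Int.mod i (R : Int)) * (C : Int) +
      PySem.Int.floordiv i (R : Int))
    (G := fun c => if PySem.Int.mod c 2 == 1 then
          ((List.range R).map (fun r : Nat => (r : Int) * (C : Int) + c)).reverse
        else (List.range R).map (fun r : Nat => (r : Int) * (C : Int) + c))
  intro q hq
  by_cases hpar : q % 2 = 1
  · rw [if_pos (by rw [pv_mod_two, hpar]; rfl),
      ← pv_rev_block R (fun r => r * (C : Int) + (q : Nat))]
    apply List.map_congr_left
    intro j hj
    simp only [List.mem_range] at hj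
    rw [pv_fdiv q R j hR hj, pv_fmod q R j hj, pv_mod_two,
      if_neg (by rw [hpar]; decide)]
  · have hpar0 : q % 2 = 0 := by omega
    rw [if_neg (by rw [pv_mod_two, hpar0]; decide)]
    apply List.map_congr_left
    intro j hj
    simp only [List.mem_range] at hj
    rw [pv_fdiv q R j hR hj, pv_fmod q R j hj, pv_mod_two,
      if_pos (by rw [hpar0]; rfl)]

-- ===== VERDICT (by name: the statement is the Claim_ definition above) =====
theorem wave_pattern_spec : Claim_equal_wave_pattern := by
  intro rows cols horizontal _
  unfold Spec_wave_pattern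
  by_cases hr : rows ≤ 0
  · cases horizontal <;>
      simp [wave_pattern, wave_pattern_alt, hr, PySem.List.pyRange_one_eq_nil hr]
  · by_cases hc : cols ≤ 0
    · cases horizontal <;>
        simp [wave_pattern, wave_pattern_alt, hc, PySem.List.pyRange_one_eq_nil hc]
    · have hR : rows = ((rows.toNat : Nat) : Int) := by omega
      have hC : cols = ((cols.toNat : Nat) : Int) := by omega
      cases horizontal with
      | true =>
        have hinner : ∀ r : Int,
            (PySem.List.pyRange 0 cols 1).foldl (fun rb c => rb ++ [r * cols + c]) [] =
              (PySem.List.pyRange 0 cols 1).map (fun c => r * cols + c) := by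
          intro r
          rw [PySem.List.foldl_append_eq_flatMap (g := fun c => [r * cols + c])]
          exact (List.map_eq_flatMap ..).symm
        unfold wave_pattern wave_pattern_alt
        simp only [if_pos, hinner]
        rw [PySem.List.foldl_append_eq_flatMap]
        rw [if_neg (by simp [hr, hc])]
        rw [hR, hC, ← Nat.cast_mul]
        simp only [PySem.List.pyRange_zero_nat, List.flatMap_map, List.map_map]
        exact (pv_main_h rows.toNat cols.toNat (by omega)).symm
      | false =>
        have hinner : ∀ c : Int,
            (PySem.List.pyRange 0 rows 1).foldl (fun cb r => cb ++ [r * cols + c]) [] =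
              (PySem.List.pyRange 0 rows 1).map (fun r => r * cols + c) := by
          intro c
          rw [PySem.List.foldl_append_eq_flatMap (g := fun r => [r * cols + c])]
          exact (List.map_eq_flatMap ..).symm
        unfold wave_pattern wave_pattern_alt
        simp only [Bool.false_eq_true, ite_false, hinner]
        rw [PySem.List.foldl_append_eq_flatMap]
        rw [if_neg (by simp [hr, hc])]
        rw [hR, hC, ← Nat.cast_mul, Nat.mul_comm rows.toNat cols.toNat]
        simp only [PySem.List.pyRange_zero_nat, List.flatMap_map, List.map_map]
        exact (pv_main_v rows.toNat cols.toNat (by omega)).symm
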